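-- pv_equiv track=rewrite | github.com/atvKail/solve | SolutionsOnSites/Codeforces/Codeforces Round 1005 (Div. 2)/C.py | solve
-- ===== SOURCE A (Python) =====
-- def solve(m: int, a: list):
--     idxpref = [0] * (m + 1)
--     for i in range(1, m + 1):
--         idxpref[i] = idxpref[i - 1] + (a[i - 1] if a[i - 1] > 0 else 0)
--
--     negsuffix = [0] * (m + 2)
--     for i in range(m - 1, -1, -1):
--         negsuffix[i + 1] = negsuffix[i + 2] + (-a[i] if a[i] < 0 else 0)
--
--     allPos = idxpref[m]
--     allNeg = negsuffix[1]
--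
--     ans = max(allPos, allNeg)
--     for x in range(0, m + 1):
--         cur = idxpref[x] + negsuffix[x + 1]
--         if cur > ans:
--             ans = cur
--     return str(ans)
-- ===== SOURCE B (Python) =====
-- def solve(m: int, a: list):
--     totalNeg = 0
--     run = 0
--     best = 0
--     for v in a[:m]:
--         if v < 0:
--             totalNeg -= v
--         run += v
--         if run > best:
--             best = run
--     return str(totalNeg + best)
-- ===== Notes on version B (the rewrite author's own statement) =====
-- stated objective: simpler
-- what changed: Replaced A's two O(m) auxiliary arrays (positive-prefix and negative-suffix sums) and separate split-point scan by a single pass tracking total negative magnitude and the running maximum prefix sum, using the identity cur(x) = totalNeg + prefixSum(x).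
import Mathlib
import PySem

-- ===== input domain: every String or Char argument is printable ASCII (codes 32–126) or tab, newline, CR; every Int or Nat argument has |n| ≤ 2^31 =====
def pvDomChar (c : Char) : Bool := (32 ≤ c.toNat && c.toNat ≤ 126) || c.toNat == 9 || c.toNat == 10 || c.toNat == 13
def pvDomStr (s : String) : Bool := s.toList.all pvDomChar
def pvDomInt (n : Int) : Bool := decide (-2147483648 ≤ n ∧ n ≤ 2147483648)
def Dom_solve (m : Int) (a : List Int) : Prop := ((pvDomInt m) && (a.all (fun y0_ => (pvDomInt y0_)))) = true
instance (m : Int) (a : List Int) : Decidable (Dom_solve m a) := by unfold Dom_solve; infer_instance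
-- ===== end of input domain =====

-- B replaces A's two auxiliary prefix/suffix arrays and split-point scan by one pass keeping
-- the total negative magnitude and the running maximum prefix sum (simpler, O(1) extra space).

-- ===== PORT A =====
-- idxpref[i] of A: left-to-right accumulation of a[i-1] when positive
def solvePref (a : List Int) : Nat → Int
  | 0 => 0
  | i+1 => solvePref a i + (if a.getD i 0 > 0 then a.getD i 0 else 0)

-- negsuffix[j+1] of A: right-to-left accumulation of -a[i] when a[i] < 0, for i from n-1 down to j
def solveNegsuf (a : List Int) (n : Nat) (j : Nat) : Int :=
  if _h : j < n then (if a.getD j 0 < 0 then -(a.getD j 0) else 0) + solveNegsuf a n (j+1) else 0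
  termination_by n - j

def solve (m : Int) (a : List Int) : String :=
  let n := m.toNat
  let allPos := solvePref a n
  let allNeg := solveNegsuf a n 0
  let ans := (List.range (n+1)).foldl (fun ans x =>
      let cur := solvePref a x + solveNegsuf a n x
      if cur > ans then cur else ans) (max allPos allNeg)
  PySem.Int.toStr ans

-- ===== PORT B =====
def solve_alt (m : Int) (a : List Int) : String :=
  let st := (PySem.List.slice a none (some m)).foldl
    (fun (s : Int × Int × Int) v =>
      let tn := if v < 0 then s.1 - v else s.1
      let run := s.2.1 + v
      let best := if run > s.2.2 then run else s.2.2
      (tn, run, best)) (0, 0, 0)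
  PySem.Int.toStr (st.1 + st.2.2)

-- ===== PRECONDITION & SPEC =====
-- A raises IndexError whenever m < 0 (idxpref[m] on a too-short list) or m > len(a) (a[i-1]).
def Pre_solve (m : Int) (a : List Int) : Prop := 0 ≤ m ∧ m ≤ a.length
instance (m : Int) (a : List Int) : Decidable (Pre_solve m a) := by unfold Pre_solve; infer_instance
def pvWitness_solve : Int × List Int := (3, [1, -2, 3])

def Spec_solve (m : Int) (a : List Int) (out : String) : Prop := out = solve_alt m a
instance (m : Int) (a : List Int) (out : String) : Decidable (Spec_solve m a out) := by unfold Spec_solve; infer_instance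

-- ===== CLAIM (what is proved, stated in full; the proofs are below) =====
def Claim_equal_solve : Prop := ∀ (m : Int) (a : List Int), Dom_solve m a → Pre_solve m a → Spec_solve m a (solve m a)

-- ===== LEMMAS AND PROOFS =====

def negS : List Int → Int
  | [] => 0
  | v :: l => (if v < 0 then -v else 0) + negS l

def posS : List Int → Int
  | [] => 0
  | v :: l => (if v > 0 then v else 0) + posS l

def maxPref : List Int → Int
  | [] => 0
  | v :: l => max 0 (v + maxPref l)

def maxG (g : Nat → Int) : Nat → Int
  | 0 => g 0
  | k+1 => max (maxG g k) (g (k+1))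

theorem if_gt_eq_max (x y : Int) : (if y > x then y else x) = max x y := by
  rcases le_total x y with h | h <;> simp [max_def] <;> omega

theorem maxPref_nonneg (l : List Int) : 0 ≤ maxPref l := by
  cases l <;> simp [maxPref]

theorem sum_le_maxPref (l : List Int) : l.sum ≤ maxPref l := by
  induction l with
  | nil => simp [maxPref]
  | cons v l ih =>
    simp only [maxPref, List.sum_cons]
    have := le_max_right (0 : Int) (v + maxPref l)
    omega

theorem posS_sub_negS (l : List Int) : posS l - negS l = l.sum := by
  induction l with
  | nil => simp [posS, negS]
  | cons v l ih => simp only [posS, negS, List.sum_cons]; split_ifs <;> omega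

theorem negS_append (s t : List Int) : negS (s ++ t) = negS s + negS t := by
  induction s with
  | nil => simp [negS]
  | cons v s ih => simp [negS, ih]; ring

theorem posS_append (s t : List Int) : posS (s ++ t) = posS s + posS t := by
  induction s with
  | nil => simp [posS]
  | cons v s ih => simp [posS, ih]; ring

theorem pref_eq (a : List Int) (x : Nat) (hx : x ≤ a.length) :
    solvePref a x = posS (a.take x) := by
  induction x with
  | zero => simp [solvePref, posS]
  | succ i ih =>
    have hi : i < a.length := by omega
    rw [solvePref, ih (by omega), List.take_add_one]
    have : a[i]? = some a[i] := List.getElem?_eq_getElem hi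
    rw [this]
    simp only [Option.toList, posS_append, posS]
    have hg : a.getD i 0 = a[i] := List.getD_eq_getElem a 0 hi
    rw [hg]; ring

theorem negsuf_eq (a : List Int) (n : Nat) (hn : n ≤ a.length) (j : Nat) :
    solveNegsuf a n j = negS ((a.take n).drop j) := by
  rw [solveNegsuf]
  split
  · rename_i h
    have hlen : j < (a.take n).length := by simp [List.length_take]; omega
    rw [List.drop_eq_getElem_cons hlen]
    have hg : (a.take n)[j] = a[j]'(by omega) := List.getElem_take
    have hd : a.getD j 0 = a[j]'(by omega) := List.getD_eq_getElem a 0 (by omega)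
    rw [negsuf_eq a n hn (j+1)]
    simp only [negS, hg, hd]
  · rename_i h
    have : (a.take n).drop j = [] := by
      apply List.drop_eq_nil_of_le; simp [List.length_take]; omega
    simp [this, negS]
  termination_by n - j

-- cur(x) identity: A's split value at x equals total negative magnitude plus the prefix sum
theorem cur_eq (a : List Int) (n : Nat) (hn : n ≤ a.length) (x : Nat) (hx : x ≤ n) :
    solvePref a x + solveNegsuf a n x = negS (a.take n) + ((a.take n).take x).sum := by
  have h1 : solvePref a x = posS ((a.take n).take x) := by
    rw [pref_eq a x (by omega), List.take_take, Nat.min_eq_left hx]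
  have h2 : solveNegsuf a n x = negS ((a.take n).drop x) := negsuf_eq a n hn x
  have h3 : negS (a.take n) = negS ((a.take n).take x) + negS ((a.take n).drop x) := by
    conv_lhs => rw [← List.take_append_drop x (a.take n)]
    exact negS_append _ _
  have h4 := posS_sub_negS ((a.take n).take x)
  omega

theorem foldl_range_max (g : Nat → Int) (init : Int) (k : Nat) :
    (List.range (k+1)).foldl (fun ans x => if g x > ans then g x else ans) init
      = max init (maxG g k) := by
  induction k with
  | zero => simp [List.range_succ, maxG, if_gt_eq_max]
  | succ k ih =>
    rw [List.range_succ, List.foldl_append, ih]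
    simp only [List.foldl_cons, List.foldl_nil, if_gt_eq_max, maxG]
    rw [max_assoc]

theorem maxG_congr (g g' : Nat → Int) (k : Nat) (h : ∀ x ≤ k, g x = g' x) :
    maxG g k = maxG g' k := by
  induction k with
  | zero => simpa [maxG] using h 0 (by omega)
  | succ k ih =>
    simp only [maxG]
    rw [ih (fun x hx => h x (by omega)), h (k+1) (by omega)]

theorem maxG_const_add (C : Int) (g : Nat → Int) (k : Nat) :
    maxG (fun x => C + g x) k = C + maxG g k := by
  induction k with
  | zero => simp [maxG]
  | succ k ih => simp only [maxG, ih]; omega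

theorem maxG_cons (v : Int) (l : List Int) (k : Nat) :
    maxG (fun x => (((v :: l).take x).sum)) (k+1)
      = max 0 (v + maxG (fun x => ((l.take x).sum)) k) := by
  induction k with
  | zero => simp [maxG]
  | succ k ih =>
    simp only [maxG] at *
    rw [ih]
    have : ((v :: l).take (k+2)).sum = v + (l.take (k+1)).sum := by
      simp [List.take_succ_cons]
    rw [this]
    simp only [max_def]
    split_ifs <;> omega

theorem maxG_eq_maxPref (l : List Int) :
    maxG (fun x => ((l.take x).sum)) l.length = maxPref l := by
  induction l with
  | nil => simp [maxG, maxPref]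
  | cons v l ih =>
    simp only [List.length_cons, maxPref]
    rw [maxG_cons, ih]

theorem alt_fold (l : List Int) (tn run best : Int) (h : run ≤ best) :
    l.foldl (fun (s : Int × Int × Int) v =>
      let tn := if v < 0 then s.1 - v else s.1
      let run := s.2.1 + v
      let best := if run > s.2.2 then run else s.2.2
      (tn, run, best)) (tn, run, best)
    = (tn + negS l, run + l.sum, max best (run + maxPref l)) := by
  induction l generalizing tn run best with
  | nil =>
    simp only [List.foldl_nil, negS, maxPref, List.sum_nil]
    have : max best (run + 0) = best := by omega
    rw [this]; simp
  | cons v l ih =>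
    simp only [List.foldl_cons]
    rw [ih _ _ _ (by rw [if_gt_eq_max]; exact le_max_right _ _)]
    have h0 := maxPref_nonneg l
    refine Prod.ext ?_ (Prod.ext ?_ ?_) <;> simp only [negS, maxPref, List.sum_cons]
    · split_ifs <;> omega
    · ring
    · rw [if_gt_eq_max]
      simp only [max_def]
      split_ifs <;> omega

-- ===== VERDICT (by name: the statement is the Claim_ definition above) =====
theorem solve_spec : Claim_equal_solve := by
  intro m a _dom pre
  obtain ⟨hm, hml⟩ := pre
  unfold Spec_solve solve solve_alt
  set n := m.toNat with hn
  have hna : n ≤ a.length := by omega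
  set l := a.take n with hl
  have hslice : PySem.List.slice a none (some m) = l := PySem.List.slice_to a hm
  rw [hslice, alt_fold l 0 0 0 (le_refl 0)]
  simp only []
  congr 1
  -- both integers equal negS l + maxPref l
  have hll : l.length = n := by simp [hl, List.length_take]; omega
  have hg : ∀ x ≤ n, solvePref a x + solveNegsuf a n x = negS l + ((l.take x).sum) :=
    fun x hx => cur_eq a n hna x hx
  rw [foldl_range_max (fun x => solvePref a x + solveNegsuf a n x) _ n]
  rw [maxG_congr _ (fun x => negS l + ((l.take x).sum)) n (by intro x hx; exact hg x hx)]
  rw [maxG_const_add]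
  have hPos : solvePref a n = posS l := pref_eq a n hna
  have hNeg : solveNegsuf a n 0 = negS l := by
    rw [negsuf_eq a n hna 0]; simp [hl]
  rw [hPos, hNeg, ← hll, maxG_eq_maxPref]
  have h1 := posS_sub_negS l
  have h2 := sum_le_maxPref l
  have h3 := maxPref_nonneg l
  have : (l.take l.length).sum = l.sum := by simp
  simp only [max_def]
  split_ifs <;> omega
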